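-- pv_equiv track=rewrite | github.com/bharadwajvyadavalli/coding_markdowns | advanced_algorithms.py | longest_most_frequent_prefix
-- ===== SOURCE A (Python) =====
-- def longest_most_frequent_prefix(strings):
--     """
--     Find the longest prefix that appears in the most strings.
--
--     Approach: Build prefix trie and count occurrences
--     Time Complexity: O(n*s) where n is number of strings, s is max string length
--     Space Complexity: O(n*s)
--     """
--     class TrieNode:
--         def __init__(self):
--             self.children = {}
--             self.count = 0
--
--     def build_prefix_trie(strings):
--         root = TrieNode()
--         for string in strings:
--             node = root
--             for char in string:
--                 if char not in node.children:
--                     node.children[char] = TrieNode()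
--                 node = node.children[char]
--                 node.count += 1
--         return root
--
--     def find_longest_most_frequent(trie, total_strings):
--         result = ""
--         max_count = 0
--         current = trie
--
--         while current.children:
--             best_char = None
--             best_count = 0
--
--             for char, child in current.children.items():
--                 if child.count > best_count:
--                     best_count = child.count
--                     best_char = char
--
--             if best_count < total_strings // 2:
--                 break
--
--             result += best_char
--             current = current.children[best_char]
--
--         return result
--
--     trie = build_prefix_trie(strings)
--     return find_longest_most_frequent(trie, len(strings))
-- ===== SOURCE B (Python) =====
-- def longest_most_frequent_prefix(strings):
--     """Trie-free re-implementation: keep the current prefix and the list of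
--     candidate strings that start with it; extend greedily one character at a
--     time using an insertion-ordered tally of the next character."""
--     threshold = len(strings) // 2
--     prefix = ""
--     candidates = strings
--     while True:
--         pos = len(prefix)
--         tally = {}
--         for s in candidates:
--             if len(s) > pos:
--                 c = s[pos]
--                 tally[c] = tally.get(c, 0) + 1
--         best_char = None
--         best_count = 0
--         for c, n in tally.items():
--             if n > best_count:
--                 best_char = c
--                 best_count = n
--         if best_char is None or best_count < threshold:
--             break
--         prefix += best_char
--         candidates = [s for s in candidates if len(s) > pos and s[pos] == best_char]
--     return prefix
-- ===== Notes on version B (the rewrite author's own statement) =====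
-- stated objective: simpler
-- what changed: Replaced the trie construction (per-node children dicts with counts, then a greedy walk over trie nodes) by a trie-free greedy loop that keeps the current prefix and filters a candidate list, tallying the next character of the surviving candidates with an insertion-ordered dict each round.
import Mathlib
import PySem

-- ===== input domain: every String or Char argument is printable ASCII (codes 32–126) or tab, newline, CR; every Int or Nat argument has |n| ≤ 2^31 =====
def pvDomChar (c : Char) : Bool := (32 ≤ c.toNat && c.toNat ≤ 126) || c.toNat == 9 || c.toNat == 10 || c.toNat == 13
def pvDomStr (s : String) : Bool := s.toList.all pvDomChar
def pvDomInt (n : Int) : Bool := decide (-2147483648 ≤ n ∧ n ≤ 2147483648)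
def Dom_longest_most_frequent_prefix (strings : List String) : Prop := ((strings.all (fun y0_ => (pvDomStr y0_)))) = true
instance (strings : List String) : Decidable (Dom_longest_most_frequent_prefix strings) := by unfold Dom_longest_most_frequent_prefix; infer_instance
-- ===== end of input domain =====

-- B replaces A's prefix trie by a greedy prefix-extension loop over a filtered candidate
-- list with an insertion-ordered next-character tally: simpler (no trie), same results.
-- ===== PORT A =====
-- Python's per-node `children` dicts would be a nested inductive in Lean, so the trie is
-- stored flat: a node is identified by its path of characters from the root; `cnt` maps a
-- nonempty path to that node's `count` and `kid` maps a path to the insertion-ordered list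
-- of its children's characters (= `children` keys; child node at path p++[c]).
-- The walk in find_longest_most_frequent keeps `result` equal to the current node's path,
-- so the port carries the single path `p`; `fuel` only makes the while-loop structural
-- (one unit per iteration; each iteration extends the path by one character).
def pvInsChar (st : PySem.Dict (List Char) Int × PySem.Dict (List Char) (List Char) × List Char)
    (c : Char) : PySem.Dict (List Char) Int × PySem.Dict (List Char) (List Char) × List Char :=
  let cnt := st.1
  let kid := st.2.1
  let p := st.2.2
  let ks := kid.getD p []
  -- if char not in node.children: node.children[char] = TrieNode()
  let cnt := if c ∈ ks then cnt else cnt.insert (p ++ [c]) 0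
  let kid := if c ∈ ks then kid else kid.insert p (ks ++ [c])
  -- node = node.children[char]; node.count += 1
  (cnt.insert (p ++ [c]) (cnt.getD (p ++ [c]) 0 + 1), kid, p ++ [c])

def pvInsString (st : PySem.Dict (List Char) Int × PySem.Dict (List Char) (List Char))
    (s : String) : PySem.Dict (List Char) Int × PySem.Dict (List Char) (List Char) :=
  let r := s.toList.foldl pvInsChar (st.1, st.2, ([] : List Char))
  (r.1, r.2.1)

def pvBuildTrie (strings : List String) :
    PySem.Dict (List Char) Int × PySem.Dict (List Char) (List Char) :=
  strings.foldl pvInsString (PySem.Dict.empty, PySem.Dict.empty)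

-- for char, child in current.children.items(): if child.count > best_count: …
def pvBestChild (cnt : PySem.Dict (List Char) Int) (p : List Char) (ks : List Char) :
    Option Char × Int :=
  ks.foldl (fun b c =>
    let n := cnt.getD (p ++ [c]) 0
    if n > b.2 then (some c, n) else b) (none, 0)

def pvFindA (cnt : PySem.Dict (List Char) Int) (kid : PySem.Dict (List Char) (List Char))
    (total : Int) : Nat → List Char → List Char
  | 0, p => p
  | fuel + 1, p =>
    let ks := kid.getD p []
    if ks = [] then p          -- while current.children: … (loop exit)
    else
      let b := pvBestChild cnt p ks
      if b.2 < PySem.Int.floordiv total 2 then p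
      else
        match b.1 with
        | some c => pvFindA cnt kid total fuel (p ++ [c])
        | none => p            -- unreachable: a nonempty children dict has a child of count ≥ 1

def longest_most_frequent_prefix (strings : List String) : String :=
  let t := pvBuildTrie strings
  String.ofList (pvFindA t.1 t.2 (strings.length : Int)
    (1 + (strings.map (fun s => s.toList.length)).sum) [])

-- ===== PORT B =====
-- tally = {}; for s in candidates: if len(s) > pos: tally[s[pos]] = tally.get(s[pos], 0) + 1
def pvTally (pos : Nat) (cands : List String) : PySem.Dict Char Int :=
  cands.foldl (fun d s =>
    match s.toList[pos]? with
    | some c => d.insert c (d.getD c 0 + 1)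
    | none => d) PySem.Dict.empty

-- for c, n in tally.items(): if n > best_count: …
def pvBestItem (items : List (Char × Int)) : Option Char × Int :=
  items.foldl (fun b ci => if ci.2 > b.2 then (some ci.1, ci.2) else b) (none, 0)

def pvFindB (threshold : Int) : Nat → List Char → List String → List Char
  | 0, pref, _ => pref
  | fuel + 1, pref, cands =>
    let pos := pref.length
    let b := pvBestItem (pvTally pos cands).items
    match b.1 with
    | none => pref             -- if best_char is None … : break
    | some c =>
      if b.2 < threshold then pref
      else
        pvFindB threshold fuel (pref ++ [c])
          (cands.filter (fun s =>
            match s.toList[pos]? with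
            | some c' => c' == c
            | none => false))

def longest_most_frequent_prefix_alt (strings : List String) : String :=
  String.ofList (pvFindB (PySem.Int.floordiv (strings.length : Int) 2)
    (1 + (strings.map (fun s => s.toList.length)).sum) [] strings)

-- ===== PRECONDITION & SPEC =====
def Spec_longest_most_frequent_prefix (strings : List String) (out : String) : Prop := out = longest_most_frequent_prefix_alt strings
instance (strings : List String) (out : String) : Decidable (Spec_longest_most_frequent_prefix strings out) := by unfold Spec_longest_most_frequent_prefix; infer_instance

-- ===== CLAIM (what is proved, stated in full; the proofs are below) =====
def Claim_equal_longest_most_frequent_prefix : Prop := ∀ (strings : List String), Dom_longest_most_frequent_prefix strings → Spec_longest_most_frequent_prefix strings (longest_most_frequent_prefix strings)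

-- ===== LEMMAS AND PROOFS =====

-- The next character of string s after the prefix q (none if q is not a proper prefix of s).
def pvNext (q : List Char) (s : String) : Option Char :=
  if q <+: s.toList then s.toList[q.length]? else none

-- The flat trie (cnt, kid) is the trie of the strings ss: at each node (path q) the
-- children in insertion order are the distinct next characters of the strings extending q,
-- in first-appearance order, and the count of a (nonempty) node q is the number of strings
-- having q as a prefix.
def pvModels (cnt : PySem.Dict (List Char) Int) (kid : PySem.Dict (List Char) (List Char))
    (ss : List String) : Prop :=
  (∀ q, kid.getD q [] = PySem.Set.ofList (ss.filterMap (pvNext q))) ∧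
  (∀ q, q ≠ [] → cnt.getD q 0 = (ss.countP (fun s => decide (q <+: s.toList)) : Int))

theorem pv_prefix_snoc (q s : List Char) (c : Char) :
    q ++ [c] <+: s ↔ q <+: s ∧ s[q.length]? = some c := by
  constructor
  · rintro ⟨t, rfl⟩
    refine ⟨⟨c :: t, by simp⟩, by simp⟩
  · rintro ⟨⟨t, rfl⟩, h⟩
    rcases t with _ | ⟨d, t⟩
    · simp at h
    · simp at h
      subst h
      exact ⟨t, by simp⟩

theorem pv_prefix_step (p q : List Char) (c : Char) (cs : List Char)
    (h1 : p <+: q) (h2 : q <+: p ++ c :: cs) (h3 : q ≠ p) : p ++ [c] <+: q := by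
  obtain ⟨r, rfl⟩ := h1
  rcases r with _ | ⟨d, r⟩
  · simp at h3
  · have := (List.prefix_append_right_inj p).mp h2
    rcases this with ⟨t, ht⟩
    cases ht
    exact ⟨r, by simp⟩

theorem pv_insFold (cs : List Char) : ∀ (p : List Char)
    (cnt : PySem.Dict (List Char) Int) (kid : PySem.Dict (List Char) (List Char)),
    (∀ q c, c ∉ kid.getD q [] → cnt.getD (q ++ [c]) 0 = 0) →
    ((cs.foldl pvInsChar (cnt, kid, p)).2.2 = p ++ cs) ∧
    (∀ q, (cs.foldl pvInsChar (cnt, kid, p)).2.1.getD q [] =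
      if p <+: q ∧ q <+: p ++ cs then
        match (p ++ cs)[q.length]? with
        | some c => if c ∈ kid.getD q [] then kid.getD q [] else kid.getD q [] ++ [c]
        | none => kid.getD q []
      else kid.getD q []) ∧
    (∀ q, (cs.foldl pvInsChar (cnt, kid, p)).1.getD q 0 =
      cnt.getD q 0 + if p <+: q ∧ q ≠ p ∧ q <+: p ++ cs then 1 else 0) := by
  induction cs with
  | nil =>
    intro p cnt kid _
    refine ⟨by simp, ?_, ?_⟩
    · intro q
      simp only [List.foldl_nil, List.append_nil]
      split
      · next hq =>
        have : q = p := hq.2.eq_of_length_le hq.1.length_le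
        subst this
        rw [List.getElem?_eq_none (le_refl q.length)]
      · rfl
    · intro q
      simp only [List.foldl_nil, List.append_nil]
      rw [if_neg (by rintro ⟨h1, h2, h3⟩; exact h2 (h3.eq_of_length_le h1.length_le))]
      omega
  | cons c cs' ih =>
    intro p cnt kid H
    have hlen : ¬ (p ++ [c] <+: p) := by
      intro h
      have := h.length_le
      simp at this
    -- one step of the fold
    have hst : pvInsChar (cnt, kid, p) c =
        (cnt.insert (p ++ [c]) (cnt.getD (p ++ [c]) 0 + 1),
         (if c ∈ kid.getD p [] then kid else kid.insert p (kid.getD p [] ++ [c])), p ++ [c]) := by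
      by_cases hc : c ∈ kid.getD p []
      · simp [pvInsChar, hc]
      · simp only [pvInsChar, if_neg hc]
        rw [H p c hc]
        simp [PySem.Dict.getD_insert_self, PySem.Dict.insert_insert_self]
    set cnt1 := cnt.insert (p ++ [c]) (cnt.getD (p ++ [c]) 0 + 1) with hcnt1
    set kid1 := (if c ∈ kid.getD p [] then kid else kid.insert p (kid.getD p [] ++ [c])) with hkid1
    have K1 : ∀ q, kid1.getD q [] =
        if q = p then (if c ∈ kid.getD p [] then kid.getD p [] else kid.getD p [] ++ [c])
        else kid.getD q [] := by
      intro q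
      rw [hkid1]
      by_cases hc : c ∈ kid.getD p []
      · rw [if_pos hc]
        split <;> simp_all
      · rw [if_neg hc, PySem.Dict.getD_insert]
        split <;> simp_all
    have C1 : ∀ q, cnt1.getD q 0 =
        if q = p ++ [c] then cnt.getD (p ++ [c]) 0 + 1 else cnt.getD q 0 := by
      intro q
      rw [hcnt1, PySem.Dict.getD_insert]
    have H1 : ∀ q' c', c' ∉ kid1.getD q' [] → cnt1.getD (q' ++ [c']) 0 = 0 := by
      intro q' c' hmem
      by_cases heq : q' ++ [c'] = p ++ [c]
      · obtain ⟨h1, h2⟩ := List.append_inj' heq rfl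
        simp at h2
        subst h1; subst h2
        exfalso
        rw [K1 q', if_pos rfl] at hmem
        by_cases hc : c' ∈ kid.getD q' [] <;> simp [hc] at hmem
      · rw [C1, if_neg heq]
        apply H
        intro hmem2
        apply hmem
        rw [K1]
        split
        · next hqp =>
          subst hqp
          split <;> simp [hmem2]
        · exact hmem2
    have hIH := ih (p ++ [c]) cnt1 kid1 H1
    have hfold : (c :: cs').foldl pvInsChar (cnt, kid, p) = cs'.foldl pvInsChar (cnt1, kid1, p ++ [c]) := by
      rw [List.foldl_cons, hst]
    rw [hfold]
    refine ⟨by rw [hIH.1]; simp, ?_, ?_⟩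
    · intro q
      rw [hIH.2.1 q, K1 q]
      by_cases hq : q = p
      · subst hq
        rw [if_neg (by rintro ⟨h1, _⟩; exact hlen h1)]
        rw [if_pos (show q <+: q ∧ q <+: q ++ c :: cs' from ⟨List.prefix_refl q, ⟨c :: cs', rfl⟩⟩)]
        have hget : (q ++ c :: cs')[q.length]? = some c := by simp
        rw [hget]
        simp
      · rw [if_neg hq]
        by_cases hpc : p ++ [c] <+: q
        · have hpq : p <+: q := (List.prefix_append p [c]).trans hpc
          have hiff : (p ++ [c] <+: q ∧ q <+: p ++ [c] ++ cs') ↔ (p <+: q ∧ q <+: p ++ c :: cs') := by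
            constructor
            · rintro ⟨_, h2⟩; exact ⟨hpq, by simpa using h2⟩
            · rintro ⟨_, h2⟩; exact ⟨hpc, by simpa using h2⟩
          by_cases hcond : p <+: q ∧ q <+: p ++ c :: cs'
          · rw [if_pos (hiff.mpr hcond), if_pos hcond]
            have hpe : p ++ [c] ++ cs' = p ++ c :: cs' := by simp
            rw [hpe]
          · rw [if_neg (fun h => hcond (hiff.mp h)), if_neg hcond]
        · rw [if_neg (by rintro ⟨h1, _⟩; exact hpc h1)]
          rw [if_neg (by rintro ⟨h1, h2⟩; exact hpc (pv_prefix_step p q c cs' h1 h2 hq))]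
    · intro q
      rw [hIH.2.2 q, C1]
      by_cases hq : q = p ++ [c]
      · subst hq
        rw [if_pos rfl, if_neg (by rintro ⟨_, h2, _⟩; exact h2 rfl)]
        rw [if_pos (show p <+: p ++ [c] ∧ p ++ [c] ≠ p ∧ p ++ [c] <+: p ++ c :: cs' from
          ⟨List.prefix_append p [c], by simp, by simpa using List.prefix_append (p ++ [c]) cs'⟩)]
        omega
      · rw [if_neg hq]
        by_cases hpc : p ++ [c] <+: q
        · have hpq : p <+: q := (List.prefix_append p [c]).trans hpc
          have hqp : q ≠ p := by rintro rfl; exact hlen hpc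
          by_cases hsuf : q <+: p ++ c :: cs'
          · rw [if_pos ⟨hpc, hq, by simpa using hsuf⟩, if_pos ⟨hpq, hqp, hsuf⟩]
          · rw [if_neg (by rintro ⟨_, _, h3⟩; exact hsuf (by simpa using h3)), if_neg (by rintro ⟨_, _, h3⟩; exact hsuf h3)]
        · rw [if_neg (by rintro ⟨h1, _, _⟩; exact hpc h1)]
          by_cases hqp : q = p
          · subst hqp
            rw [if_neg (by rintro ⟨_, h2, _⟩; exact h2 rfl)]
          · rw [if_neg (by rintro ⟨h1, _, h3⟩; exact hpc (pv_prefix_step p q c cs' h1 h3 hqp))]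


theorem pv_insString_models (cnt : PySem.Dict (List Char) Int)
    (kid : PySem.Dict (List Char) (List Char)) (ss : List String) (s : String)
    (h : pvModels cnt kid ss) :
    pvModels (pvInsString (cnt, kid) s).1 (pvInsString (cnt, kid) s).2 (ss ++ [s]) := by
  have H : ∀ q c, c ∉ kid.getD q [] → cnt.getD (q ++ [c]) 0 = 0 := by
    intro q c hc
    rw [h.2 (q ++ [c]) (by simp)]
    have : ss.countP (fun s => decide (q ++ [c] <+: s.toList)) = 0 := by
      rw [List.countP_eq_zero]
      intro s hs hpre
      rw [decide_eq_true_eq] at hpre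
      rw [pv_prefix_snoc] at hpre
      apply hc
      rw [h.1 q]
      rw [PySem.Set.mem_ofList]
      exact List.mem_filterMap.mpr ⟨s, hs, by simp [pvNext, hpre.1, hpre.2]⟩
    rw [this]
    rfl
  obtain ⟨-, hK, hC⟩ := pv_insFold s.toList [] cnt kid H
  constructor
  · intro q
    show (s.toList.foldl pvInsChar (cnt, kid, [])).2.1.getD q [] = _
    rw [hK q]
    simp only [List.nil_prefix, List.nil_append, true_and]
    rw [List.filterMap_append]
    by_cases hpre : q <+: s.toList
    · rw [if_pos hpre]
      have hnext : List.filterMap (pvNext q) [s] =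
          match s.toList[q.length]? with
          | some c => [c]
          | none => [] := by
        simp only [List.filterMap_cons, List.filterMap_nil, pvNext, if_pos hpre]
        cases s.toList[q.length]? <;> rfl
      cases hx : s.toList[q.length]? with
      | none => rw [hnext, hx]; simp [h.1 q]
      | some c =>
        rw [hnext, hx]
        have : PySem.Set.ofList (ss.filterMap (pvNext q) ++ [c]) =
            PySem.Set.add (PySem.Set.ofList (ss.filterMap (pvNext q))) c := by
          simp [PySem.Set.ofList_eq_foldl]
        rw [this]
        have hadd : ∀ (t : PySem.Set Char), PySem.Set.add t c = if c ∈ t then t else t ++ [c] := by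
          intro t
          simp [PySem.Set.add, PySem.Set.contains]
        rw [hadd, ← h.1 q]
    · rw [if_neg hpre]
      have : List.filterMap (pvNext q) [s] = [] := by
        simp [pvNext, hpre]
      rw [this, List.append_nil, h.1 q]
  · intro q hq
    show (s.toList.foldl pvInsChar (cnt, kid, [])).1.getD q 0 = _
    rw [hC q]
    simp only [List.nil_prefix, List.nil_append, true_and]
    rw [h.2 q hq, List.countP_append]
    by_cases hpre : q <+: s.toList
    · rw [if_pos ⟨hq, hpre⟩]
      simp [hpre]
    · rw [if_neg (by rintro ⟨-, h2⟩; exact hpre h2)]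
      simp [hpre]

theorem pv_build_models (ss2 : List String) : ∀ (ss1 : List String)
    (cnt : PySem.Dict (List Char) Int) (kid : PySem.Dict (List Char) (List Char)),
    pvModels cnt kid ss1 →
    pvModels (ss2.foldl pvInsString (cnt, kid)).1 (ss2.foldl pvInsString (cnt, kid)).2
      (ss1 ++ ss2) := by
  induction ss2 with
  | nil => intro ss1 cnt kid h; simpa using h
  | cons s t ih =>
    intro ss1 cnt kid h
    have h1 := pv_insString_models cnt kid ss1 s h
    have h2 := ih (ss1 ++ [s]) (pvInsString (cnt, kid) s).1 (pvInsString (cnt, kid) s).2 h1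
    simpa using h2

theorem pv_tally_eq (pos : Nat) (cands : List String) :
    pvTally pos cands = PySem.Dict.counter (cands.filterMap (fun s => s.toList[pos]?)) := by
  suffices h : ∀ (l : List String) (d : PySem.Dict Char Int),
      l.foldl (fun d s =>
        match s.toList[pos]? with
        | some c => d.insert c (d.getD c 0 + 1)
        | none => d) d
      = (l.filterMap (fun s => s.toList[pos]?)).foldl
          (fun d x => d.insert x (d.getD x 0 + 1)) d by
    rw [pvTally, h, PySem.Dict.foldl_insert_getD_add_one_eq_counter]
  intro l
  induction l with
  | nil => intro d; rfl
  | cons s t ih => intro d; cases hx : s.toList[pos]? <;> simp [hx, ih]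

theorem pv_bestChild_eq (cnt : PySem.Dict (List Char) Int) (p : List Char) (ks : List Char) :
    pvBestChild cnt p ks = pvBestItem (ks.map (fun c => (c, cnt.getD (p ++ [c]) 0))) := by
  rw [pvBestChild, pvBestItem, List.foldl_map]

theorem pv_bestItem_isSome (items : List (Char × Int)) (h1 : ∀ x ∈ items, 1 ≤ x.2)
    (h2 : items ≠ []) : (pvBestItem items).1.isSome := by
  have step : ∀ (its : List (Char × Int)) (b : Option Char × Int), b.1.isSome →
      (its.foldl (fun b ci => if ci.2 > b.2 then (some ci.1, ci.2) else b) b).1.isSome := by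
    intro its
    induction its with
    | nil => exact fun b hb => hb
    | cons x t ih =>
      intro b hb
      simp only [List.foldl_cons]
      by_cases hx : x.2 > b.2
      · exact ih _ (by simp [hx])
      · exact ih _ (by simpa [hx] using hb)
  rcases items with _ | ⟨x, t⟩
  · exact absurd rfl h2
  have hx : (1 : Int) ≤ x.2 := h1 x (by simp)
  rw [pvBestItem]
  simp only [List.foldl_cons]
  exact step t _ (by simp [show x.2 > (0:Int) by omega])

theorem pv_walk (cnt : PySem.Dict (List Char) Int) (kid : PySem.Dict (List Char) (List Char))
    (ss : List String) (h : pvModels cnt kid ss) : ∀ (fuel : Nat) (p : List Char),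
    pvFindA cnt kid (ss.length : Int) fuel p =
      pvFindB (PySem.Int.floordiv (ss.length : Int) 2) fuel p
        (ss.filter (fun s => decide (p <+: s.toList))) := by
  intro fuel
  induction fuel with
  | zero => intro p; rfl
  | succ fuel ihf =>
    intro p
    have hl : (ss.filter (fun s => decide (p <+: s.toList))).filterMap
        (fun s => s.toList[p.length]?) = ss.filterMap (pvNext p) := by
      rw [List.filterMap_filter]
      congr 1
      funext s
      simp [pvNext]
    have hks : kid.getD p [] = PySem.Set.ofList (ss.filterMap (pvNext p)) := h.1 p
    have hitems : (pvTally p.length (ss.filter (fun s => decide (p <+: s.toList)))).items =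
        (kid.getD p []).map (fun c => (c, cnt.getD (p ++ [c]) 0)) := by
      rw [pv_tally_eq, PySem.Dict.items_counter, hl, hks]
      apply List.map_congr_left
      intro c hc
      have hcl : c ∈ ss.filterMap (pvNext p) := (PySem.Set.mem_ofList _ _).mp hc
      congr 1
      rw [h.2 (p ++ [c]) (by simp), List.count_filterMap]
      have : List.countP (fun a => pvNext p a == some c) ss =
          List.countP (fun s => decide (p ++ [c] <+: s.toList)) ss := by
        apply List.countP_congr
        intro s _
        have hiff := pv_prefix_snoc p s.toList c
        simp only [pvNext]
        by_cases hpre : p <+: s.toList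
        · rw [if_pos hpre]
          by_cases hsc : s.toList[p.length]? = some c
          · simp [hsc, hiff.mpr ⟨hpre, hsc⟩]
          · have hnp : ¬ (p ++ [c] <+: s.toList) := fun hx => hsc (hiff.mp hx).2
            cases hx : s.toList[p.length]? with
            | none => simp [hnp]
            | some d =>
              have hdc : ¬ d = c := fun hdc => hsc (by rw [hx, hdc])
              simp [hdc, hnp]
        · rw [if_neg hpre]
          have hnp : ¬ (p ++ [c] <+: s.toList) := fun hx => hpre (hiff.mp hx).1
          simp [hnp]
      rw [this]
    simp only [pvFindA, pvFindB]
    by_cases hks0 : kid.getD p [] = []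
    · rw [if_pos hks0]
      have : (pvTally p.length (ss.filter (fun s => decide (p <+: s.toList)))).items = [] := by
        rw [hitems, hks0]
        rfl
      rw [this]
      rfl
    · rw [if_neg hks0]
      rw [pv_bestChild_eq, ← hitems]
      have hsome : (pvBestItem (pvTally p.length
          (ss.filter (fun s => decide (p <+: s.toList)))).items).1.isSome := by
        apply pv_bestItem_isSome
        · intro x hx
          rw [hitems] at hx
          obtain ⟨c, hc, rfl⟩ := List.mem_map.mp hx
          have hcl : c ∈ ss.filterMap (pvNext p) :=
            (PySem.Set.mem_ofList _ _).mp (hks ▸ hc)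
          obtain ⟨s, hs, hnext⟩ := List.mem_filterMap.mp hcl
          simp only [pvNext] at hnext
          by_cases hpre : p <+: s.toList
          · rw [if_pos hpre] at hnext
            have : p ++ [c] <+: s.toList := (pv_prefix_snoc p s.toList c).mpr ⟨hpre, hnext⟩
            rw [h.2 (p ++ [c]) (by simp)]
            have : 1 ≤ ss.countP (fun s => decide (p ++ [c] <+: s.toList)) := by
              rw [Nat.one_le_iff_ne_zero, Ne, List.countP_eq_zero]
              push_neg
              exact ⟨s, hs, by simpa using this⟩
            simpa using this
          · rw [if_neg hpre] at hnext
            exact absurd hnext (by simp)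
        · intro hnil
          rw [hitems, List.map_eq_nil_iff] at hnil
          exact hks0 hnil
      obtain ⟨c, hc⟩ := Option.isSome_iff_exists.mp hsome
      rw [hc]
      have hcands : (ss.filter (fun s => decide (p <+: s.toList))).filter
          (fun s => match s.toList[p.length]? with
            | some c' => c' == c
            | none => false) = ss.filter (fun s => decide (p ++ [c] <+: s.toList)) := by
        rw [List.filter_filter]
        congr 1
        funext s
        have hiff := pv_prefix_snoc p s.toList c
        by_cases hpre : p <+: s.toList
        · cases hx : s.toList[p.length]? with
          | none =>
            have hnp : ¬ (p ++ [c] <+: s.toList) := fun h2 => by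
              have := (hiff.mp h2).2
              rw [hx] at this
              cases this
            simp [hpre, hx, hnp]
          | some d =>
            by_cases hdc : d = c
            · subst hdc
              simp [hpre, hx, hiff.mpr ⟨hpre, hx⟩]
            · have hnp : ¬ (p ++ [c] <+: s.toList) := fun h2 => hdc (by
                have := (hiff.mp h2).2
                rw [hx] at this
                exact Option.some_inj.mp this)
              simp [hpre, hx, hnp, hdc]
        · have hnp : ¬ (p ++ [c] <+: s.toList) := fun h2 => hpre (hiff.mp h2).1
          simp [hpre, hnp]
      show (if (pvBestItem (pvTally p.length (ss.filter (fun s => decide (p <+: s.toList)))).items).2 <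
            PySem.Int.floordiv (ss.length : Int) 2 then p
          else pvFindA cnt kid (ss.length : Int) fuel (p ++ [c])) =
        (if (pvBestItem (pvTally p.length (ss.filter (fun s => decide (p <+: s.toList)))).items).2 <
            PySem.Int.floordiv (ss.length : Int) 2 then p
          else pvFindB (PySem.Int.floordiv (ss.length : Int) 2) fuel (p ++ [c])
            ((ss.filter (fun s => decide (p <+: s.toList))).filter
              (fun s => match s.toList[p.length]? with
                | some c' => c' == c
                | none => false)))
      split_ifs with hthr
      · rfl
      · rw [hcands]
        exact ihf (p ++ [c])

-- ===== VERDICT (by name: the statement is the Claim_ definition above) =====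
theorem longest_most_frequent_prefix_spec : Claim_equal_longest_most_frequent_prefix := by
  intro strings _
  unfold Spec_longest_most_frequent_prefix longest_most_frequent_prefix longest_most_frequent_prefix_alt pvBuildTrie
  have hm := pv_build_models strings [] PySem.Dict.empty PySem.Dict.empty
    (by constructor <;> intro q <;> simp [PySem.Dict.getD_empty])
  simp only [List.nil_append] at hm
  show String.ofList (pvFindA (strings.foldl pvInsString (PySem.Dict.empty, PySem.Dict.empty)).1
      (strings.foldl pvInsString (PySem.Dict.empty, PySem.Dict.empty)).2 (strings.length : Int)
      (1 + (strings.map (fun s => s.toList.length)).sum) []) = _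
  rw [pv_walk _ _ _ hm]
  congr 1
  simp
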